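-- pv_equiv track=rewrite | github.com/OpenBlatam/AI-Models-Clone | agents/backend_ads/agents/backend/onyx/server/features/blog_posts/domains/content/nlp_enhanced_engine.py | _improve_sentiment
-- ===== SOURCE A (Python) =====
-- def _improve_sentiment(content: str) -> str:
--     """Improve content sentiment."""
--     try:
--         # Simple sentiment enhancement
--         positive_replacements = {
--             'problem': 'challenge',
--             'difficult': 'interesting',
--             'can\'t': 'haven\'t yet',
--             'impossible': 'challenging',
--             'failure': 'learning opportunity'
--         }
--
--         enhanced_content = content
--         for negative, positive in positive_replacements.items():
--             enhanced_content = enhanced_content.replace(negative, positive)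
--
--         return enhanced_content
--     except:
--         return content
-- ===== SOURCE B (Python) =====
-- def _improve_sentiment(content: str) -> str:
--     """Improve content sentiment (single left-to-right scan with a lookup table)."""
--     try:
--         positive_replacements = {
--             'problem': 'challenge',
--             'difficult': 'interesting',
--             'can\'t': 'haven\'t yet',
--             'impossible': 'challenging',
--             'failure': 'learning opportunity'
--         }
--
--         out = []
--         i = 0
--         n = len(content)
--         while i < n:
--             for negative, positive in positive_replacements.items():
--                 if content.startswith(negative, i):
--                     out.append(positive)
--                     i += len(negative)
--                     break
--             else:
--                 out.append(content[i])
--                 i += 1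
--         return ''.join(out)
--     except:
--         return content
-- ===== Notes on version B (the rewrite author's own statement) =====
-- stated objective: alternative
-- what changed: A makes five sequential whole-string str.replace passes; B scans the content once left to right, emitting the table replacement at each key match (valid because no key overlaps another and no replacement reintroduces a key), otherwise copying the character.
import Mathlib
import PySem

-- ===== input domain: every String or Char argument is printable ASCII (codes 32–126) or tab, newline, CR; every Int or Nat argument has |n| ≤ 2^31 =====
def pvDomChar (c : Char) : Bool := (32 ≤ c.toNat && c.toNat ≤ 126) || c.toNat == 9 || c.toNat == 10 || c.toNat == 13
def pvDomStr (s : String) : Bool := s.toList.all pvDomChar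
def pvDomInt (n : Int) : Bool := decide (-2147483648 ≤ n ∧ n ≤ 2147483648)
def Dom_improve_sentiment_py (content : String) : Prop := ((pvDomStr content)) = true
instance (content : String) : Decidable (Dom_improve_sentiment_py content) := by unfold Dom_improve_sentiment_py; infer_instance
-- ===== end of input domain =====

-- B replaces A's five sequential whole-string `.replace` passes by ONE left-to-right scan with a
-- prefix-match table (valid because no key overlaps another and no replacement reintroduces a key);
-- objective: alternative single-pass algorithm, same return value on every string.

-- ===== PORT A =====
-- A: five sequential str.replace passes, in dict insertion order.
def improve_sentiment_py (content : String) : String :=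
  let e1 := PySem.Str.replace content "problem" "challenge"
  let e2 := PySem.Str.replace e1 "difficult" "interesting"
  let e3 := PySem.Str.replace e2 "can't" "haven't yet"
  let e4 := PySem.Str.replace e3 "impossible" "challenging"
  let e5 := PySem.Str.replace e4 "failure" "learning opportunity"
  e5

-- ===== PORT B =====
-- B's table, keys and replacements in the same (dict insertion) order as the Python table.
def pvK1 : List Char := ['p', 'r', 'o', 'b', 'l', 'e', 'm']
def pvR1 : List Char := ['c', 'h', 'a', 'l', 'l', 'e', 'n', 'g', 'e']
def pvK2 : List Char := ['d', 'i', 'f', 'f', 'i', 'c', 'u', 'l', 't']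
def pvR2 : List Char := ['i', 'n', 't', 'e', 'r', 'e', 's', 't', 'i', 'n', 'g']
def pvK3 : List Char := ['c', 'a', 'n', '\'', 't']
def pvR3 : List Char := ['h', 'a', 'v', 'e', 'n', '\'', 't', ' ', 'y', 'e', 't']
def pvK4 : List Char := ['i', 'm', 'p', 'o', 's', 's', 'i', 'b', 'l', 'e']
def pvR4 : List Char := ['c', 'h', 'a', 'l', 'l', 'e', 'n', 'g', 'i', 'n', 'g']
def pvK5 : List Char := ['f', 'a', 'i', 'l', 'u', 'r', 'e']
def pvR5 : List Char := ['l', 'e', 'a', 'r', 'n', 'i', 'n', 'g', ' ', 'o', 'p', 'p', 'o', 'r', 't', 'u', 'n', 'i', 't', 'y']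

-- B's single left-to-right scan: at each position try the keys in table order
-- (content.startswith(negative, i)); on a match emit the replacement and skip the key,
-- otherwise emit the character and move on.
def pvScanB : List Char → List Char
  | [] => []
  | c :: cs =>
    if pvK1.isPrefixOf (c :: cs) then pvR1 ++ pvScanB (List.drop pvK1.length (c :: cs))
    else if pvK2.isPrefixOf (c :: cs) then pvR2 ++ pvScanB (List.drop pvK2.length (c :: cs))
    else if pvK3.isPrefixOf (c :: cs) then pvR3 ++ pvScanB (List.drop pvK3.length (c :: cs))
    else if pvK4.isPrefixOf (c :: cs) then pvR4 ++ pvScanB (List.drop pvK4.length (c :: cs))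
    else if pvK5.isPrefixOf (c :: cs) then pvR5 ++ pvScanB (List.drop pvK5.length (c :: cs))
    else c :: pvScanB cs
termination_by l => l.length
decreasing_by all_goals simp [pvK1, pvK2, pvK3, pvK4, pvK5]

def improve_sentiment_py_alt (content : String) : String :=
  String.ofList (pvScanB content.toList)

-- ===== PRECONDITION & SPEC =====
def Spec_improve_sentiment_py (content : String) (out : String) : Prop := out = improve_sentiment_py_alt content
instance (content : String) (out : String) : Decidable (Spec_improve_sentiment_py content out) := by unfold Spec_improve_sentiment_py; infer_instance

-- ===== CLAIM (what is proved, stated in full; the proofs are below) =====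
def Claim_equal_improve_sentiment_py : Prop := ∀ (content : String), Dom_improve_sentiment_py content → Spec_improve_sentiment_py content (improve_sentiment_py content)

-- ===== LEMMAS AND PROOFS =====

-- A clean recursion computing Python's str.replace (for a nonempty pattern); proof-side only.
def pvRep : List Char → List Char → List Char → List Char
  | _, _, [] => []
  | old, new, c :: t =>
    if old.isPrefixOf (c :: t) then new ++ pvRep old new (List.drop (old.length - 1) t)
    else c :: pvRep old new t
termination_by _ _ l => l.length
decreasing_by
  · simp
  · simp

theorem pvGo_spec (old new : List Char) (hold : old ≠ []) :
    ∀ fuel l acc, l.length ≤ fuel →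
      PySem.Chars.replace.go old new fuel l acc = acc.reverse ++ pvRep old new l := by
  intro fuel
  induction fuel with
  | zero => intro l acc h; cases l with
    | nil => simp [PySem.Chars.replace.go, pvRep]
    | cons c t => simp at h
  | succ n ih =>
    intro l acc h
    cases l with
    | nil => simp [PySem.Chars.replace.go, pvRep]
    | cons c t =>
      rw [PySem.Chars.replace.go]
      by_cases hp : old.isPrefixOf (c :: t) = true
      · rw [if_pos hp]
        rw [ih]
        · rw [pvRep, if_pos hp]
          have : List.drop old.length (c :: t) = List.drop (old.length - 1) t := by
            cases old with
            | nil => simp at hold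
            | cons a o => simp
          simp [this]
        · have : old.length ≥ 1 := by cases old; simp at hold; simp
          simp at h ⊢; omega
      · rw [if_neg hp, ih]
        · rw [pvRep, if_neg hp]; simp
        · simp at h ⊢; omega

theorem pvRep_eq_replace (old new : List Char) (hold : old ≠ []) (l : List Char) :
    PySem.Chars.replace l old new = pvRep old new l := by
  rw [PySem.Chars.replace]
  rw [if_neg (by simp [List.isEmpty_iff, hold])]
  exact pvGo_spec old new hold l.length l [] le_rfl

theorem pvRep_nil (old new : List Char) : pvRep old new [] = [] := by rw [pvRep]

-- Unfolding pvRep at a match: old is a prefix, so it is consumed and replaced.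
theorem pvRep_match (old new l : List Char) (hold : old ≠ []) (h : old <+: l) :
    pvRep old new l = new ++ pvRep old new (List.drop old.length l) := by
  cases l with
  | nil =>
    have := List.prefix_nil.mp h
    exact absurd this hold
  | cons c t =>
    rw [pvRep, if_pos (List.isPrefixOf_iff_prefix.mpr h)]
    cases old with
    | nil => exact absurd rfl hold
    | cons a o => simp

-- Unfolding pvRep at a non-match.
theorem pvRep_nomatch (old new : List Char) (c : Char) (cs : List Char)
    (h : ¬ old <+: (c :: cs)) :
    pvRep old new (c :: cs) = c :: pvRep old new cs := by
  rw [pvRep, if_neg (by simpa [List.isPrefixOf_iff_prefix] using h)]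

-- If s is a prefix of new ++ x, its first |new| characters are a prefix of new.
theorem pvTakePrefix (s new x : List Char) (h : s <+: new ++ x) :
    List.take new.length s <+: new := by
  have := h.take new.length
  rwa [List.take_left] at this

-- pvRep passes over a block u none of whose suffixes interacts with the pattern.
theorem pvRep_append (old new u : List Char)
    (h : ∀ v ∈ u.tails, v ≠ [] → ¬ v <+: old ∧ ¬ old <+: v) (t : List Char) :
    pvRep old new (u ++ t) = u ++ pvRep old new t := by
  induction u with
  | nil => simp
  | cons c u' ih =>
    have hself := h (c :: u') ((List.mem_tails _ _).mpr (List.suffix_refl _)) (by simp)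
    have hnp : ¬ old <+: (c :: u') ++ t := by
      intro hp
      by_cases hle : old.length ≤ (c :: u').length
      · exact hself.2 (List.prefix_of_prefix_length_le hp (List.prefix_append _ _) hle)
      · exact hself.1 (List.prefix_of_prefix_length_le (List.prefix_append _ _) hp (by omega))
    have : (c :: u') ++ t = c :: (u' ++ t) := by simp
    rw [this] at hnp ⊢
    rw [pvRep_nomatch old new c (u' ++ t) hnp]
    rw [ih (fun v hv hne => h v (by
      rcases (List.mem_tails _ _).mp hv with hsuf
      exact (List.mem_tails _ _).mpr (hsuf.trans (List.suffix_cons c u'))) hne)]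
    simp

-- If no nonempty suffix of w can begin the replacement text, pvRep cannot create
-- a new occurrence of any nonempty suffix of w at the front of its output.
theorem pvPreserve (old new w : List Char) (hold : old ≠ [])
    (hw : ∀ s ∈ w.tails, s ≠ [] → ¬ List.take new.length s <+: new) :
    ∀ t, ∀ s ∈ w.tails, s ≠ [] → ¬ s <+: t → ¬ s <+: pvRep old new t := by
  intro t
  induction t with
  | nil =>
    intro s hs hne _h hpre
    rw [pvRep_nil] at hpre
    exact hne (List.prefix_nil.mp hpre)
  | cons c t' ih =>
    intro s hs hne hnot hpre
    by_cases hp : old <+: (c :: t')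
    · rw [pvRep_match old new _ hold hp] at hpre
      exact hw s hs hne (pvTakePrefix _ _ _ hpre)
    · rw [pvRep_nomatch old new c t' hp] at hpre
      cases s with
      | nil => exact hne rfl
      | cons a s' =>
        rcases List.cons_prefix_cons.mp hpre with ⟨rfl, hs'⟩
        by_cases hz : s' = []
        · subst hz
          exact hnot (List.cons_prefix_cons.mpr ⟨rfl, List.nil_prefix⟩)
        · have hs'mem : s' ∈ w.tails :=
            (List.mem_tails _ _).mpr ((List.suffix_cons a s').trans ((List.mem_tails _ _).mp hs))
          exact ih s' hs'mem hz
            (fun h => hnot (List.cons_prefix_cons.mpr ⟨rfl, h⟩)) hs'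

-- A's chain of the five replaces, on character lists.
def pvChain (l : List Char) : List Char :=
  pvRep pvK5 pvR5 (pvRep pvK4 pvR4 (pvRep pvK3 pvR3 (pvRep pvK2 pvR2 (pvRep pvK1 pvR1 l))))

theorem pvChain_nil : pvChain [] = [] := by simp [pvChain, pvRep_nil]

-- The chain consumes a leading key exactly like the scan does.
theorem pvChain_key1 (t : List Char) :
    pvChain (pvK1 ++ t) = pvR1 ++ pvChain t := by
  unfold pvChain
  rw [pvRep_match pvK1 pvR1 _ (by decide) (List.prefix_append _ _), List.drop_left,
      pvRep_append pvK2 pvR2 pvR1 (by decide),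
      pvRep_append pvK3 pvR3 pvR1 (by decide),
      pvRep_append pvK4 pvR4 pvR1 (by decide),
      pvRep_append pvK5 pvR5 pvR1 (by decide)]

theorem pvChain_key2 (t : List Char) :
    pvChain (pvK2 ++ t) = pvR2 ++ pvChain t := by
  unfold pvChain
  rw [pvRep_append pvK1 pvR1 pvK2 (by decide),
      pvRep_match pvK2 pvR2 _ (by decide) (List.prefix_append _ _), List.drop_left,
      pvRep_append pvK3 pvR3 pvR2 (by decide),
      pvRep_append pvK4 pvR4 pvR2 (by decide),
      pvRep_append pvK5 pvR5 pvR2 (by decide)]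

theorem pvChain_key3 (t : List Char) :
    pvChain (pvK3 ++ t) = pvR3 ++ pvChain t := by
  unfold pvChain
  rw [pvRep_append pvK1 pvR1 pvK3 (by decide),
      pvRep_append pvK2 pvR2 pvK3 (by decide),
      pvRep_match pvK3 pvR3 _ (by decide) (List.prefix_append _ _), List.drop_left,
      pvRep_append pvK4 pvR4 pvR3 (by decide),
      pvRep_append pvK5 pvR5 pvR3 (by decide)]

theorem pvChain_key4 (t : List Char) :
    pvChain (pvK4 ++ t) = pvR4 ++ pvChain t := by
  unfold pvChain
  rw [pvRep_append pvK1 pvR1 pvK4 (by decide),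
      pvRep_append pvK2 pvR2 pvK4 (by decide),
      pvRep_append pvK3 pvR3 pvK4 (by decide),
      pvRep_match pvK4 pvR4 _ (by decide) (List.prefix_append _ _), List.drop_left,
      pvRep_append pvK5 pvR5 pvR4 (by decide)]

theorem pvChain_key5 (t : List Char) :
    pvChain (pvK5 ++ t) = pvR5 ++ pvChain t := by
  unfold pvChain
  rw [pvRep_append pvK1 pvR1 pvK5 (by decide),
      pvRep_append pvK2 pvR2 pvK5 (by decide),
      pvRep_append pvK3 pvR3 pvK5 (by decide),
      pvRep_append pvK4 pvR4 pvK5 (by decide),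
      pvRep_match pvK5 pvR5 _ (by decide) (List.prefix_append _ _), List.drop_left]

-- When no key matches at the front, the chain emits the head character unchanged:
-- no earlier replacement can create a key occurrence there.
theorem pvChain_none (c : Char) (cs : List Char)
    (h1 : ¬ pvK1 <+: c :: cs) (h2 : ¬ pvK2 <+: c :: cs) (h3 : ¬ pvK3 <+: c :: cs)
    (h4 : ¬ pvK4 <+: c :: cs) (h5 : ¬ pvK5 <+: c :: cs) :
    pvChain (c :: cs) = c :: pvChain cs := by
  unfold pvChain
  rw [pvRep_nomatch pvK1 pvR1 c cs h1]
  -- step 2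
  have n2 : ¬ pvK2 <+: c :: pvRep pvK1 pvR1 cs := by
    intro hp
    rcases List.cons_prefix_cons.mp (show ('d' : Char) :: pvK2.tail <+: c :: pvRep pvK1 pvR1 cs from hp) with ⟨hc, htl⟩
    have hcs : ¬ pvK2.tail <+: cs := fun h => h2 (by
      rw [show pvK2 = 'd' :: pvK2.tail from rfl, ← hc]
      exact List.cons_prefix_cons.mpr ⟨rfl, h⟩)
    exact pvPreserve pvK1 pvR1 pvK2 (by decide) (by decide) cs pvK2.tail (by decide) (by decide) hcs htl
  rw [pvRep_nomatch pvK2 pvR2 c _ n2]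
  -- step 3
  have n3 : ¬ pvK3 <+: c :: pvRep pvK2 pvR2 (pvRep pvK1 pvR1 cs) := by
    intro hp
    rcases List.cons_prefix_cons.mp (show ('c' : Char) :: pvK3.tail <+: _ from hp) with ⟨hc, htl⟩
    have hcs : ¬ pvK3.tail <+: cs := fun h => h3 (by
      rw [show pvK3 = 'c' :: pvK3.tail from rfl, ← hc]
      exact List.cons_prefix_cons.mpr ⟨rfl, h⟩)
    have p1 := pvPreserve pvK1 pvR1 pvK3 (by decide) (by decide) cs pvK3.tail (by decide) (by decide) hcs
    exact pvPreserve pvK2 pvR2 pvK3 (by decide) (by decide) _ pvK3.tail (by decide) (by decide) p1 htl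
  rw [pvRep_nomatch pvK3 pvR3 c _ n3]
  -- step 4
  have n4 : ¬ pvK4 <+: c :: pvRep pvK3 pvR3 (pvRep pvK2 pvR2 (pvRep pvK1 pvR1 cs)) := by
    intro hp
    rcases List.cons_prefix_cons.mp (show ('i' : Char) :: pvK4.tail <+: _ from hp) with ⟨hc, htl⟩
    have hcs : ¬ pvK4.tail <+: cs := fun h => h4 (by
      rw [show pvK4 = 'i' :: pvK4.tail from rfl, ← hc]
      exact List.cons_prefix_cons.mpr ⟨rfl, h⟩)
    have p1 := pvPreserve pvK1 pvR1 pvK4 (by decide) (by decide) cs pvK4.tail (by decide) (by decide) hcs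
    have p2 := pvPreserve pvK2 pvR2 pvK4 (by decide) (by decide) _ pvK4.tail (by decide) (by decide) p1
    exact pvPreserve pvK3 pvR3 pvK4 (by decide) (by decide) _ pvK4.tail (by decide) (by decide) p2 htl
  rw [pvRep_nomatch pvK4 pvR4 c _ n4]
  -- step 5
  have n5 : ¬ pvK5 <+: c :: pvRep pvK4 pvR4 (pvRep pvK3 pvR3 (pvRep pvK2 pvR2 (pvRep pvK1 pvR1 cs))) := by
    intro hp
    rcases List.cons_prefix_cons.mp (show ('f' : Char) :: pvK5.tail <+: _ from hp) with ⟨hc, htl⟩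
    have hcs : ¬ pvK5.tail <+: cs := fun h => h5 (by
      rw [show pvK5 = 'f' :: pvK5.tail from rfl, ← hc]
      exact List.cons_prefix_cons.mpr ⟨rfl, h⟩)
    have p1 := pvPreserve pvK1 pvR1 pvK5 (by decide) (by decide) cs pvK5.tail (by decide) (by decide) hcs
    have p2 := pvPreserve pvK2 pvR2 pvK5 (by decide) (by decide) _ pvK5.tail (by decide) (by decide) p1
    have p3 := pvPreserve pvK3 pvR3 pvK5 (by decide) (by decide) _ pvK5.tail (by decide) (by decide) p2
    exact pvPreserve pvK4 pvR4 pvK5 (by decide) (by decide) _ pvK5.tail (by decide) (by decide) p3 htl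
  rw [pvRep_nomatch pvK5 pvR5 c _ n5]

theorem pvScanB_key1 (t : List Char)  :
    pvScanB (pvK1 ++ t) = pvR1 ++ pvScanB t := by
  have hcons : pvK1 ++ t = 'p' :: 'r' :: 'o' :: 'b' :: 'l' :: 'e' :: 'm' :: t := by simp [pvK1]
  rw [hcons, pvScanB, ← hcons]

  rw [if_pos (List.isPrefixOf_iff_prefix.mpr (List.prefix_append _ _)), List.drop_left]

theorem pvScanB_key2 (t : List Char) (h1 : ¬ pvK1 <+: pvK2 ++ t) :
    pvScanB (pvK2 ++ t) = pvR2 ++ pvScanB t := by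
  have hcons : pvK2 ++ t = 'd' :: 'i' :: 'f' :: 'f' :: 'i' :: 'c' :: 'u' :: 'l' :: 't' :: t := by simp [pvK2]
  rw [hcons, pvScanB, ← hcons]
  rw [if_neg (fun hh => h1 (List.isPrefixOf_iff_prefix.mp hh))]
  rw [if_pos (List.isPrefixOf_iff_prefix.mpr (List.prefix_append _ _)), List.drop_left]

theorem pvScanB_key3 (t : List Char) (h1 : ¬ pvK1 <+: pvK3 ++ t) (h2 : ¬ pvK2 <+: pvK3 ++ t) :
    pvScanB (pvK3 ++ t) = pvR3 ++ pvScanB t := by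
  have hcons : pvK3 ++ t = 'c' :: 'a' :: 'n' :: '\'' :: 't' :: t := by simp [pvK3]
  rw [hcons, pvScanB, ← hcons]
  rw [if_neg (fun hh => h1 (List.isPrefixOf_iff_prefix.mp hh))]
  rw [if_neg (fun hh => h2 (List.isPrefixOf_iff_prefix.mp hh))]
  rw [if_pos (List.isPrefixOf_iff_prefix.mpr (List.prefix_append _ _)), List.drop_left]

theorem pvScanB_key4 (t : List Char) (h1 : ¬ pvK1 <+: pvK4 ++ t) (h2 : ¬ pvK2 <+: pvK4 ++ t) (h3 : ¬ pvK3 <+: pvK4 ++ t) :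
    pvScanB (pvK4 ++ t) = pvR4 ++ pvScanB t := by
  have hcons : pvK4 ++ t = 'i' :: 'm' :: 'p' :: 'o' :: 's' :: 's' :: 'i' :: 'b' :: 'l' :: 'e' :: t := by simp [pvK4]
  rw [hcons, pvScanB, ← hcons]
  rw [if_neg (fun hh => h1 (List.isPrefixOf_iff_prefix.mp hh))]
  rw [if_neg (fun hh => h2 (List.isPrefixOf_iff_prefix.mp hh))]
  rw [if_neg (fun hh => h3 (List.isPrefixOf_iff_prefix.mp hh))]
  rw [if_pos (List.isPrefixOf_iff_prefix.mpr (List.prefix_append _ _)), List.drop_left]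

theorem pvScanB_key5 (t : List Char) (h1 : ¬ pvK1 <+: pvK5 ++ t) (h2 : ¬ pvK2 <+: pvK5 ++ t) (h3 : ¬ pvK3 <+: pvK5 ++ t) (h4 : ¬ pvK4 <+: pvK5 ++ t) :
    pvScanB (pvK5 ++ t) = pvR5 ++ pvScanB t := by
  have hcons : pvK5 ++ t = 'f' :: 'a' :: 'i' :: 'l' :: 'u' :: 'r' :: 'e' :: t := by simp [pvK5]
  rw [hcons, pvScanB, ← hcons]
  rw [if_neg (fun hh => h1 (List.isPrefixOf_iff_prefix.mp hh))]
  rw [if_neg (fun hh => h2 (List.isPrefixOf_iff_prefix.mp hh))]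
  rw [if_neg (fun hh => h3 (List.isPrefixOf_iff_prefix.mp hh))]
  rw [if_neg (fun hh => h4 (List.isPrefixOf_iff_prefix.mp hh))]
  rw [if_pos (List.isPrefixOf_iff_prefix.mpr (List.prefix_append _ _)), List.drop_left]

-- The main invariant: the five-pass chain equals the single scan.
theorem pvChain_eq_scan : ∀ n, ∀ l : List Char, l.length ≤ n → pvChain l = pvScanB l := by
  intro n
  induction n with
  | zero =>
    intro l h
    have : l = [] := List.length_eq_zero_iff.mp (Nat.le_zero.mp h)
    subst this
    rw [pvChain_nil, pvScanB]
  | succ n ih =>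
    intro l h
    cases l with
    | nil => rw [pvChain_nil, pvScanB]
    | cons c cs =>
      by_cases h1 : pvK1 <+: c :: cs
      · obtain ⟨t, ht⟩ := h1
        rw [← ht, pvChain_key1, pvScanB_key1, ih t (by
          have := congrArg List.length ht
          simp [pvK1] at this ⊢; simp at h; omega)]
      · by_cases h2 : pvK2 <+: c :: cs
        · obtain ⟨t, ht⟩ := h2
          have h1' : ¬ pvK1 <+: pvK2 ++ t := by rw [ht]; exact h1
          rw [← ht, pvChain_key2, pvScanB_key2 t h1', ih t (by
            have := congrArg List.length ht
            simp [pvK2] at this ⊢; simp at h; omega)]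
        · by_cases h3 : pvK3 <+: c :: cs
          · obtain ⟨t, ht⟩ := h3
            have h1' : ¬ pvK1 <+: pvK3 ++ t := by rw [ht]; exact h1
            have h2' : ¬ pvK2 <+: pvK3 ++ t := by rw [ht]; exact h2
            rw [← ht, pvChain_key3, pvScanB_key3 t h1' h2', ih t (by
              have := congrArg List.length ht
              simp [pvK3] at this ⊢; simp at h; omega)]
          · by_cases h4 : pvK4 <+: c :: cs
            · obtain ⟨t, ht⟩ := h4
              have h1' : ¬ pvK1 <+: pvK4 ++ t := by rw [ht]; exact h1
              have h2' : ¬ pvK2 <+: pvK4 ++ t := by rw [ht]; exact h2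
              have h3' : ¬ pvK3 <+: pvK4 ++ t := by rw [ht]; exact h3
              rw [← ht, pvChain_key4, pvScanB_key4 t h1' h2' h3', ih t (by
                have := congrArg List.length ht
                simp [pvK4] at this ⊢; simp at h; omega)]
            · by_cases h5 : pvK5 <+: c :: cs
              · obtain ⟨t, ht⟩ := h5
                have h1' : ¬ pvK1 <+: pvK5 ++ t := by rw [ht]; exact h1
                have h2' : ¬ pvK2 <+: pvK5 ++ t := by rw [ht]; exact h2
                have h3' : ¬ pvK3 <+: pvK5 ++ t := by rw [ht]; exact h3
                have h4' : ¬ pvK4 <+: pvK5 ++ t := by rw [ht]; exact h4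
                rw [← ht, pvChain_key5, pvScanB_key5 t h1' h2' h3' h4', ih t (by
                  have := congrArg List.length ht
                  simp [pvK5] at this ⊢; simp at h; omega)]
              · rw [pvChain_none c cs h1 h2 h3 h4 h5]
                rw [pvScanB,
                  if_neg (fun hh => h1 (List.isPrefixOf_iff_prefix.mp hh)),
                  if_neg (fun hh => h2 (List.isPrefixOf_iff_prefix.mp hh)),
                  if_neg (fun hh => h3 (List.isPrefixOf_iff_prefix.mp hh)),
                  if_neg (fun hh => h4 (List.isPrefixOf_iff_prefix.mp hh)),
                  if_neg (fun hh => h5 (List.isPrefixOf_iff_prefix.mp hh))]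
                rw [ih cs (by simp at h; omega)]

-- ===== VERDICT (by name: the statement is the Claim_ definition above) =====
theorem improve_sentiment_py_spec : Claim_equal_improve_sentiment_py := by
  intro content _
  unfold Spec_improve_sentiment_py improve_sentiment_py improve_sentiment_py_alt
  simp only [PySem.Str.replace, String.toList_ofList]
  apply congrArg String.ofList
  rw [pvRep_eq_replace _ _ (by decide), pvRep_eq_replace _ _ (by decide),
      pvRep_eq_replace _ _ (by decide), pvRep_eq_replace _ _ (by decide),
      pvRep_eq_replace _ _ (by decide)]
  rw [show "problem".toList = pvK1 from by decide, show "challenge".toList = pvR1 from by decide,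
      show "difficult".toList = pvK2 from by decide, show "interesting".toList = pvR2 from by decide,
      show "can't".toList = pvK3 from by decide, show "haven't yet".toList = pvR3 from by decide,
      show "impossible".toList = pvK4 from by decide, show "challenging".toList = pvR4 from by decide,
      show "failure".toList = pvK5 from by decide, show "learning opportunity".toList = pvR5 from by decide]
  exact pvChain_eq_scan content.toList.length content.toList le_rfl
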